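-- pv_equiv track=rewrite | github.com/MiguelFT1/Parciales | Punto1/ADF.py | afd
-- ===== SOURCE A (Python) =====
-- def afd(token):
--     estado = 0  # Estado inicial
--     i = 0
--
--     while i < len(token):
--         char = token[i]
--
--         if estado == 0:
--             if char == '+':
--                 estado = 1  # Transición hacia SUMA
--             elif char.isdigit():
--                 estado = 3  # Transición hacia ENTERO
--             else:
--                 return "Token no válido"
--
--         elif estado == 1:
--             if char == '+':
--                 estado = 2  # Transición hacia INCR
--             else:
--                 return "Token no válido"
--
--         elif estado == 2:
--             return "INCR"
--
--         elif estado == 3: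
--             if char.isdigit():
--                 estado = 3  # Sigue siendo ENTERO
--             elif char == '.':
--                 estado = 4  # Transición hacia REAL (parte fraccionaria)
--             else:
--                 return "Token no válido"
--
--         elif estado == 4:
--             if char.isdigit():
--                 estado = 5  # Parte decimal del número real
--             else:
--                 return "Token no válido"
--
--         elif estado == 5:
--             if char.isdigit():
--                 estado = 5  # Sigue siendo REAL
--             else:
--                 return "Token no válido"
--
--         i += 1
--
--     # Determina el token final en función del estado en el que terminó
--     if estado == 1:
--         return "SUMA"
--     elif estado == 2:
--         return "INCR"
--     elif estado == 3:
--         return "ENTERO"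
--     elif estado == 5:
--         return "REAL"
--     else:
--         return "Token no válido"
-- ===== SOURCE B (Python) =====
-- def afd(token):
--     if token.startswith('++'):
--         return "INCR"
--     if token == '+':
--         return "SUMA"
--     dot = token.find('.')
--     if dot == -1:
--         if token != "" and all(c.isdigit() for c in token):
--             return "ENTERO"
--     else:
--         left, right = token[:dot], token[dot + 1:]
--         if left != "" and right != "" and all(c.isdigit() for c in left) and all(c.isdigit() for c in right):
--             return "REAL"
--     return "Token no válido"
-- ===== Notes on version B (the rewrite author's own statement) =====
-- stated objective: simpler
-- what changed: Replaces the explicit 6-state DFA loop with direct structural classification: prefix test for INCR, equality for SUMA, and a single find('.') that splits the token into integer/fractional parts checked with all(isdigit).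
import Mathlib
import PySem

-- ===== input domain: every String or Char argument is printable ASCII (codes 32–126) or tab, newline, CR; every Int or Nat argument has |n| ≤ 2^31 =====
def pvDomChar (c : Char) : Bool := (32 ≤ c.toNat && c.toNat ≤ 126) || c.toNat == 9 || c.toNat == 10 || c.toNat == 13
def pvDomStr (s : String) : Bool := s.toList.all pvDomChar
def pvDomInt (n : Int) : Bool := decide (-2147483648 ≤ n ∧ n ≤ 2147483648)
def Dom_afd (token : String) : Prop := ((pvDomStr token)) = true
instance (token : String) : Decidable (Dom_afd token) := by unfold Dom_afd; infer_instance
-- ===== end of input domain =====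

-- B replaces A's explicit 6-state DFA loop with direct structural classification
-- (prefix test, equality test, find('.') split + all-digits checks); objective: simpler.

-- ===== PORT A =====
-- the while loop over token[i], ported as structural recursion over the remaining chars,
-- carrying 'estado' exactly as A does
def afdLoop : List Char → Nat → String
  | [], e =>
    if e = 1 then "SUMA"
    else if e = 2 then "INCR"
    else if e = 3 then "ENTERO"
    else if e = 5 then "REAL"
    else "Token no válido"
  | c :: rest, e =>
    if e = 0 then
      if c = '+' then afdLoop rest 1
      else if PySem.Chars.isdigit c then afdLoop rest 3
      else "Token no válido"
    else if e = 1 then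
      if c = '+' then afdLoop rest 2 else "Token no válido"
    else if e = 2 then "INCR"
    else if e = 3 then
      if PySem.Chars.isdigit c then afdLoop rest 3
      else if c = '.' then afdLoop rest 4
      else "Token no válido"
    else if e = 4 then
      if PySem.Chars.isdigit c then afdLoop rest 5 else "Token no válido"
    else if e = 5 then
      if PySem.Chars.isdigit c then afdLoop rest 5 else "Token no válido"
    else "Token no válido"

def afd (token : String) : String := afdLoop token.toList 0

-- ===== PORT B =====
-- transliteration of Source B, on the char list of the token
def afdAltCore (s : List Char) : String :=
  if PySem.Chars.startswith s ['+', '+'] then "INCR"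
  else if s = ['+'] then "SUMA"
  else
    let dot := PySem.Chars.find s ['.']
    if dot = -1 then
      if !s.isEmpty && s.all PySem.Chars.isdigit then "ENTERO" else "Token no válido"
    else
      let left := PySem.List.slice s none (some dot)
      let right := PySem.List.slice s (some (dot + 1)) none
      if !left.isEmpty && !right.isEmpty && left.all PySem.Chars.isdigit
          && right.all PySem.Chars.isdigit then "REAL"
      else "Token no válido"

def afd_alt (token : String) : String := afdAltCore token.toList

-- ===== PRECONDITION & SPEC =====
def Spec_afd (token : String) (out : String) : Prop := out = afd_alt token
instance (token : String) (out : String) : Decidable (Spec_afd token out) := by unfold Spec_afd; infer_instance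

-- ===== CLAIM (what is proved, stated in full; the proofs are below) =====
def Claim_equal_afd : Prop := ∀ (token : String), Dom_afd token → Spec_afd token (afd token)

-- ===== LEMMAS AND PROOFS =====

theorem loop2 (r : List Char) : afdLoop r 2 = "INCR" := by
  cases r <;> simp [afdLoop]

theorem loop5 (r : List Char) :
    afdLoop r 5 = if r.all PySem.Chars.isdigit then "REAL" else "Token no válido" := by
  induction r with
  | nil => simp [afdLoop]
  | cons c t ih =>
    by_cases hc : PySem.Chars.isdigit c = true <;> simp [afdLoop, hc, ih]

theorem loop4 (r : List Char) :
    afdLoop r 4 =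
      if !r.isEmpty && r.all PySem.Chars.isdigit then "REAL" else "Token no válido" := by
  cases r with
  | nil => simp [afdLoop]
  | cons c t =>
    by_cases hc : PySem.Chars.isdigit c = true <;> simp [afdLoop, hc, loop5]

theorem loop3_no_dot (r : List Char) (h : '.' ∉ r) :
    afdLoop r 3 = if r.all PySem.Chars.isdigit then "ENTERO" else "Token no válido" := by
  induction r with
  | nil => simp [afdLoop]
  | cons c t ih =>
    have hc' : c ≠ '.' := fun hce => h (hce ▸ List.mem_cons_self)
    have ht : '.' ∉ t := fun hm => h (List.mem_cons_of_mem _ hm)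
    by_cases hc : PySem.Chars.isdigit c = true <;>
      simp [afdLoop, hc, hc', ih ht]

theorem loop3_dot (L R : List Char) (h : '.' ∉ L) :
    afdLoop (L ++ '.' :: R) 3 =
      if L.all PySem.Chars.isdigit then
        (if !R.isEmpty && R.all PySem.Chars.isdigit then "REAL" else "Token no válido")
      else "Token no válido" := by
  induction L with
  | nil =>
    have hd : PySem.Chars.isdigit '.' = false := by decide
    simp [afdLoop, hd, loop4]
  | cons a L' ih =>
    have ha : a ≠ '.' := fun hae => h (hae ▸ List.mem_cons_self)
    have hL' : '.' ∉ L' := fun hm => h (List.mem_cons_of_mem _ hm)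
    by_cases hda : PySem.Chars.isdigit a = true <;>
      simp [afdLoop, hda, ha, ih hL']

theorem plus_not_digit : PySem.Chars.isdigit '+' = false := by decide

-- B's branch once INCR/SUMA are ruled out
theorem altCore_tail (l : List Char)
    (hsw : PySem.Chars.startswith l ['+', '+'] = false) (hne : l ≠ ['+']) :
    afdAltCore l =
      (if PySem.Chars.find l ['.'] = -1 then
        if !l.isEmpty && l.all PySem.Chars.isdigit then "ENTERO" else "Token no válido"
      else
        if !(PySem.List.slice l none (some (PySem.Chars.find l ['.']))).isEmpty
            && !(PySem.List.slice l (some (PySem.Chars.find l ['.'] + 1)) none).isEmpty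
            && (PySem.List.slice l none (some (PySem.Chars.find l ['.']))).all PySem.Chars.isdigit
            && (PySem.List.slice l (some (PySem.Chars.find l ['.'] + 1)) none).all PySem.Chars.isdigit
          then "REAL" else "Token no válido") := by
  unfold afdAltCore
  rw [hsw]
  simp only [Bool.false_eq_true, if_false, if_neg hne]

theorem find_dot_nonneg (l : List Char) (hdot : PySem.Chars.find l ['.'] ≠ -1) :
    0 ≤ PySem.Chars.find l ['.'] := by
  rcases (PySem.Chars.neg_one_le_find l ['.']).lt_or_eq with h | h
  · omega
  · exact absurd h.symm hdot

-- when the head of l is not a digit, a positive find index makes the left slice fail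
theorem left_bad (c : Char) (rest : List Char) (hdig : PySem.Chars.isdigit c = false)
    (hnn : 0 ≤ PySem.Chars.find (c :: rest) ['.'])
    (hk0 : PySem.Chars.find (c :: rest) ['.'] ≠ 0) :
    (PySem.List.slice (c :: rest) none (some (PySem.Chars.find (c :: rest) ['.']))).all
      PySem.Chars.isdigit = false := by
  rw [PySem.List.slice_to _ hnn]
  have hmem : c ∈ (c :: rest).take (PySem.Chars.find (c :: rest) ['.']).toNat := by
    have : 0 < (PySem.Chars.find (c :: rest) ['.']).toNat := by omega
    exact List.mem_take_iff_getElem.mpr ⟨0, by simpa using this, rfl⟩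
  simp only [List.all_eq_true, Bool.eq_false_iff, Ne, not_forall]
  exact ⟨c, hmem, by simp [hdig]⟩

-- the core equivalence, on char lists
theorem core_eq (l : List Char) : afdLoop l 0 = afdAltCore l := by
  cases l with
  | nil => decide
  | cons c rest =>
    by_cases hplus : c = '+'
    · subst hplus
      cases rest with
      | nil => decide
      | cons c2 r2 =>
        by_cases h2 : c2 = '+'
        · subst h2
          have hsw : PySem.Chars.startswith ('+' :: '+' :: r2) ['+', '+'] = true := by
            rw [PySem.Chars.startswith_iff]
            exact ⟨r2, rfl⟩
          simp [afdLoop, afdAltCore, hsw, loop2]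
        · -- A: state 1 then c2 ≠ '+' → invalid; B: falls through to the digit machinery → invalid
          have hA : afdLoop ('+' :: c2 :: r2) 0 = "Token no válido" := by
            simp [afdLoop, h2]
          rw [hA]
          have hsw : PySem.Chars.startswith ('+' :: c2 :: r2) ['+', '+'] = false := by
            rw [Bool.eq_false_iff]
            intro hc
            rw [PySem.Chars.startswith_iff] at hc
            obtain ⟨t, ht⟩ := hc
            simp at ht
            exact h2 ht.1.symm
          rw [altCore_tail _ hsw (by simp)]
          by_cases hdot : PySem.Chars.find ('+' :: c2 :: r2) ['.'] = -1
          · have hall : ('+' :: c2 :: r2).all PySem.Chars.isdigit = false := by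
              simp [plus_not_digit]
            simp [hdot, hall]
          · have hnn := find_dot_nonneg _ hdot
            obtain ⟨hpre, _⟩ := PySem.Chars.find_spec hnn
            have hk0 : PySem.Chars.find ('+' :: c2 :: r2) ['.'] ≠ 0 := by
              intro h0
              rw [h0] at hpre
              simp [List.prefix_cons_iff] at hpre
            have hleft := left_bad '+' (c2 :: r2) plus_not_digit hnn hk0
            simp [hdot, hleft]
    · -- head is not '+': startswith "++" is false and l ≠ ['+']
      have hsw : PySem.Chars.startswith (c :: rest) ['+', '+'] = false := by
        rw [Bool.eq_false_iff]
        intro hc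
        rw [PySem.Chars.startswith_iff] at hc
        obtain ⟨t, ht⟩ := hc
        simp at ht
        exact hplus ht.1.symm
      rw [altCore_tail _ hsw (by simp [hplus])]
      by_cases hdig : PySem.Chars.isdigit c = true
      · -- head is a digit: A enters state 3
        have hA : afdLoop (c :: rest) 0 = afdLoop rest 3 := by
          simp [afdLoop, hplus, hdig]
        rw [hA]
        have hcd : c ≠ '.' := by
          intro h; rw [h] at hdig; exact absurd hdig (by decide)
        by_cases hdot : PySem.Chars.find (c :: rest) ['.'] = -1
        · -- no dot anywhere
          have hnin : ¬ (['.'] <:+: (c :: rest)) :=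
            (PySem.Chars.find_eq_neg_one_iff _ ['.']).mp hdot
          have hnd : '.' ∉ (c :: rest) := by
            intro hm
            exact hnin ((List.singleton_infix_iff '.' _).mpr hm)
          have hndr : '.' ∉ rest := fun hm => hnd (List.mem_cons_of_mem _ hm)
          rw [loop3_no_dot rest hndr]
          simp [hdot, hdig]
        · -- a dot at index k ≥ 1: l = take k ++ '.' :: drop (k+1)
          have hnn := find_dot_nonneg _ hdot
          obtain ⟨hpre, hmin⟩ := PySem.Chars.find_spec hnn
          generalize hk : (PySem.Chars.find (c :: rest) ['.']).toNat = k at hpre hmin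
          have hklen : k < (c :: rest).length := by
            rcases hpre with ⟨t, ht⟩
            have hlen := congrArg List.length ht
            simp at hlen ⊢
            omega
          have hlk : (c :: rest)[k] = '.' := by
            rcases hpre with ⟨t, ht⟩
            have h0 : (List.drop k (c :: rest))[0]? = some '.' := by rw [← ht]; rfl
            rw [List.getElem?_drop] at h0
            simp only [Nat.add_zero] at h0
            rw [List.getElem?_eq_getElem hklen] at h0
            exact Option.some.inj h0
          have hk1 : 1 ≤ k := by
            by_contra h
            have h0 : k = 0 := by omega
            subst h0
            simp at hlk
            exact hcd hlk
          have hdecomp : c :: rest = (c :: rest).take k ++ '.' :: (c :: rest).drop (k + 1) := by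
            conv_lhs => rw [← List.take_append_drop k (c :: rest)]
            rw [List.drop_eq_getElem_cons hklen, hlk]
          have htake : (c :: rest).take k = c :: rest.take (k - 1) := by
            cases k with
            | zero => omega
            | succ k' => simp
          have hrest : rest = rest.take (k - 1) ++ '.' :: (c :: rest).drop (k + 1) := by
            have h := hdecomp
            rw [htake] at h
            simpa using h
          have hndL' : '.' ∉ rest.take (k - 1) := by
            intro hm
            obtain ⟨i, hi, hgi⟩ := List.mem_take_iff_getElem.mp hm
            have hik : i < k - 1 := by omega
            have hilen : i < rest.length := by omega
            refine hmin (i + 1) (by omega) ?_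
            have hdropeq : List.drop (i + 1) (c :: rest) = List.drop i rest := by simp
            rw [hdropeq, List.drop_eq_getElem_cons hilen, hgi]
            exact ⟨rest.drop (i + 1), rfl⟩
          have hA3 : afdLoop rest 3 =
              if (rest.take (k - 1)).all PySem.Chars.isdigit then
                (if !((c :: rest).drop (k + 1)).isEmpty
                    && ((c :: rest).drop (k + 1)).all PySem.Chars.isdigit
                  then "REAL" else "Token no válido")
              else "Token no válido" := by
            conv_lhs => rw [hrest]
            exact loop3_dot _ _ hndL'
          have hleft : PySem.List.slice (c :: rest) none (some (PySem.Chars.find (c :: rest) ['.']))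
              = (c :: rest).take k := by
            rw [PySem.List.slice_to _ hnn, hk]
          have hright : PySem.List.slice (c :: rest) (some (PySem.Chars.find (c :: rest) ['.'] + 1)) none
              = (c :: rest).drop (k + 1) := by
            rw [PySem.List.slice_from _ (by omega)]
            congr 1
            omega
          rw [if_neg hdot, hleft, hright, hA3, htake]
          by_cases hLa : (rest.take (k - 1)).all PySem.Chars.isdigit = true <;>
            simp [hLa, hdig]
      · -- head is neither '+' nor a digit: both invalid
        have hA : afdLoop (c :: rest) 0 = "Token no válido" := by
          simp [afdLoop, hplus, hdig]
        rw [hA]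
        by_cases hdot : PySem.Chars.find (c :: rest) ['.'] = -1
        · have hall : (c :: rest).all PySem.Chars.isdigit = false := by
            simp [hdig]
          simp [hdot, hall]
        · have hnn := find_dot_nonneg _ hdot
          by_cases hcd : c = '.'
          · -- dot at position 0: left part is empty
            have hf0 : PySem.Chars.find (c :: rest) ['.'] = 0 := by
              obtain ⟨_, hmin⟩ := PySem.Chars.find_spec hnn
              by_contra h
              exact hmin 0 (by omega) ⟨rest, by simp [hcd]⟩
            have hleft : PySem.List.slice (c :: rest) none (some (PySem.Chars.find (c :: rest) ['.']))
                = [] := by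
              rw [PySem.List.slice_to _ hnn, hf0]
              simp
            simp [hdot, hleft]
          · -- dot later: the left slice contains the non-digit head c
            obtain ⟨hpre, hmin⟩ := PySem.Chars.find_spec hnn
            have hk0 : PySem.Chars.find (c :: rest) ['.'] ≠ 0 := by
              intro h0
              rw [h0] at hpre
              rcases hpre with ⟨t, ht⟩
              simp at ht
              exact hcd ht.1.symm
            have hleft := left_bad c rest (by simpa using hdig) hnn hk0
            simp [hdot, hleft]

-- ===== VERDICT (by name: the statement is the Claim_ definition above) =====
theorem afd_spec : Claim_equal_afd := by
  intro token _
  unfold Spec_afd afd afd_alt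
  exact core_eq token.toList
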